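-- pv_equiv track=rewrite | github.com/isavita/advent_generated | day13_part2_2023.py | parse_mirror
-- ===== SOURCE A (Python) =====
-- def parse_mirror(mirror_str):
--     rows = [0] * len(mirror_str)
--     cols = [0] * len(mirror_str[0])
--
--     for y, line in enumerate(mirror_str):
--         for x, char in enumerate(line):
--             rows[y] <<= 1
--             cols[x] <<= 1
--             if char == '#':
--                 rows[y] += 1
--                 cols[x] += 1
--
--     return rows, cols
-- ===== SOURCE B (Python) =====
-- def parse_mirror(mirror_str):
--     def val(chars):
--         s = ''.join('1' if c == '#' else '0' for c in chars)
--         return int(s, 2) if s else 0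
--
--     rows = [val(line) for line in mirror_str]
--     col_chars = [[] for _ in range(len(mirror_str[0]))]
--     for line in mirror_str:
--         for x, char in enumerate(line):
--             col_chars[x].append(char)
--     cols = [val(chars) for chars in col_chars]
--     return rows, cols
-- ===== Notes on version B (the rewrite author's own statement) =====
-- stated objective: alternative
-- what changed: Replaces A's single interleaved loop that shift-accumulates rows[] and cols[] bitmasks per character with separate passes: rows via a per-line '1'/'0'-string conversion (int(s,2)), cols by first gathering each column's characters into a transposed list and then applying the same string conversion.
import Mathlib
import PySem

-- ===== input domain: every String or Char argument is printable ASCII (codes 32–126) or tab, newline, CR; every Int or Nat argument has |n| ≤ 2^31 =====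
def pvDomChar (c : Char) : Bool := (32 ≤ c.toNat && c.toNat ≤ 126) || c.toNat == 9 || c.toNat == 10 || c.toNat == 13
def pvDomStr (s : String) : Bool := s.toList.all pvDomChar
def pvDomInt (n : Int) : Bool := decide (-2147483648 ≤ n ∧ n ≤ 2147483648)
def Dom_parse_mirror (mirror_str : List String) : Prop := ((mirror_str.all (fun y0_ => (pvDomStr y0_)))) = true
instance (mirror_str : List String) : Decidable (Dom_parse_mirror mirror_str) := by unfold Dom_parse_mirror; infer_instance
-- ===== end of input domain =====

-- B replaces A's interleaved mutating loop by two independent passes (rows via per-line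
-- binary conversion, cols via guarded column gathering); alternative decomposition, same cost.


-- ===== PORT A =====
-- one character step of A's inner loop: rows[y] <<= 1; cols[x] <<= 1; if char == '#': rows[y] += 1; cols[x] += 1
-- ('v << 1' ported as '2 * v', exact for Python ints)
def pvAStep (y : Int) (st : List Int × List Int) (xc : Int × Char) : List Int × List Int :=
  let rows := PySem.List.pySetD st.1 y (2 * PySem.List.pyGetD st.1 y 0)
  let cols := PySem.List.pySetD st.2 xc.1 (2 * PySem.List.pyGetD st.2 xc.1 0)
  if xc.2 = '#' then
    (PySem.List.pySetD rows y (PySem.List.pyGetD rows y 0 + 1),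
     PySem.List.pySetD cols xc.1 (PySem.List.pyGetD cols xc.1 0 + 1))
  else (rows, cols)

def parse_mirror (mirror_str : List String) : List Int × List Int :=
  match PySem.List.pyGet? mirror_str 0 with
  | none => ([], [])  -- mirror_str[0] raises IndexError; unreachable under Pre_
  | some first =>
    let rows : List Int := List.replicate mirror_str.length 0
    let cols : List Int := List.replicate first.toList.length 0
    (PySem.List.enumerate mirror_str 0).foldl
      (fun st yl => (PySem.List.enumerate yl.2.toList 0).foldl (pvAStep yl.1) st)
      (rows, cols)

-- ===== PORT B =====
-- val(chars): ''.join('1' if c=='#' else '0') then int(s,2) (hand-ported binary parse,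
-- exact on '0'/'1' strings) with Source B's empty-string guard returning 0
def pvBinVal (bits : List Char) : Int :=
  if bits.isEmpty then 0
  else bits.foldl (fun a c => 2 * a + (if c = '1' then 1 else 0)) 0

def pvVal (chars : List Char) : Int :=
  pvBinVal (chars.map (fun c => if c = '#' then '1' else '0'))

def parse_mirror_alt (mirror_str : List String) : List Int × List Int :=
  match mirror_str with
  | [] => ([], [])  -- mirror_str[0] raises IndexError; unreachable under Pre_
  | first :: _ =>
    let rows := mirror_str.map (fun line => pvVal line.toList)
    let colChars : List (List Char) := List.replicate first.toList.length []
    let colChars := mirror_str.foldl (fun cc line =>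
        (PySem.List.enumerate line.toList 0).foldl
          (fun cc xc =>
            PySem.List.pySetD cc xc.1 (PySem.List.pyGetD cc xc.1 [] ++ [xc.2])) cc)
      colChars
    (rows, colChars.map (fun chars => pvVal chars))

-- ===== PRECONDITION & SPEC =====
-- Pre_ excludes exactly the inputs where A raises IndexError: the empty list (mirror_str[0])
-- and grids with a line longer than the first (cols[x] out of range).
def Pre_parse_mirror (mirror_str : List String) : Prop :=
  mirror_str ≠ [] ∧ ∀ s ∈ mirror_str, s.toList.length ≤ (mirror_str.headD "").toList.length
instance (mirror_str : List String) : Decidable (Pre_parse_mirror mirror_str) := by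
  unfold Pre_parse_mirror; infer_instance
def pvWitness_parse_mirror : List String := ["#.#", ".#."]

def Spec_parse_mirror (mirror_str : List String) (out : List Int × List Int) : Prop := out = parse_mirror_alt mirror_str
instance (mirror_str : List String) (out : List Int × List Int) : Decidable (Spec_parse_mirror mirror_str out) := by unfold Spec_parse_mirror; infer_instance

-- ===== CLAIM (what is proved, stated in full; the proofs are below) =====
def Claim_equal_parse_mirror : Prop := ∀ (mirror_str : List String), Dom_parse_mirror mirror_str → Pre_parse_mirror mirror_str → Spec_parse_mirror mirror_str (parse_mirror mirror_str)

-- ===== LEMMAS AND PROOFS =====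

def pvBit (c : Char) : Int := if c = '#' then 1 else 0

-- value of A's per-character row/column update, as a fold
def pvAval (r : Int) (l : List Char) : Int := l.foldl (fun a c => 2 * a + pvBit c) r

-- effect of one line on the cols array
def pvColApply (cols : List Int) (i : Nat) : List Char → List Int
  | [] => cols
  | c :: cs => pvColApply (cols.set i (2 * cols.getD i 0 + pvBit c)) (i + 1) cs

lemma pvVal_eq_aval (l : List Char) : pvVal l = pvAval 0 l := by
  have h : ∀ (l : List Char) (r : Int),
      (l.map (fun c => if c = '#' then '1' else '0')).foldl
        (fun a c => 2 * a + (if c = '1' then 1 else 0)) r = pvAval r l := by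
    intro l
    induction l with
    | nil => intro r; simp [pvAval]
    | cons c cs ih =>
      intro r
      simp only [List.map_cons, List.foldl_cons, pvAval, pvBit] at *
      rw [ih]
      by_cases hc : c = '#' <;> simp [hc]
  cases l with
  | nil => simp [pvVal, pvBinVal, pvAval]
  | cons c cs => simpa [pvVal, pvBinVal] using h (c :: cs) 0

lemma pv_set_set_getD (cols : List Int) (i : Nat) (a b : Int) :
    cols.set i ((cols.set i a)[i]?.getD 0 + b) = cols.set i (a + b) := by
  by_cases h : i < cols.length
  · rw [List.getElem?_set_eq_of_lt a h]
    rfl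
  · rw [List.getElem?_eq_none (by simp; omega),
        List.set_eq_of_length_le (by omega), List.set_eq_of_length_le (by omega)]

lemma pv_inner_eq (l : List Char) (i : Nat) (rows cols : List Int) (y : Nat)
    (hy : y < rows.length) :
    (PySem.List.enumerate l (i : Int)).foldl (pvAStep (y : Int)) (rows, cols)
      = (rows.set y (pvAval (rows.getD y 0) l), pvColApply cols i l) := by
  induction l generalizing i rows cols with
  | nil =>
    simp [PySem.List.enumerate_nil, pvAval, pvColApply,
      List.getD, List.getElem?_eq_getElem hy]
  | cons c cs ih =>
    rw [PySem.List.enumerate_cons, List.foldl_cons]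
    have hstep : pvAStep (y : Int) (rows, cols) ((i : Int), c)
        = (rows.set y (2 * rows.getD y 0 + pvBit c),
           cols.set i (2 * cols.getD i 0 + pvBit c)) := by
      by_cases hc : c = '#' <;>
        simp [pvAStep, pvBit, hc, pv_set_set_getD, List.getD]
    rw [hstep]
    have hcast : ((i : Int) + 1) = ((i + 1 : Nat) : Int) := by push_cast; ring
    rw [hcast, ih (i + 1) _ _ (by simpa using hy)]
    simp only [Prod.mk.injEq]
    refine ⟨?_, rfl⟩
    have hget : (rows.set y (2 * rows.getD y 0 + pvBit c)).getD y 0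
        = 2 * rows.getD y 0 + pvBit c := by
      simp only [List.getD]
      rw [List.getElem?_set_eq_of_lt _ hy]
      rfl
    rw [hget, List.set_set]
    simp [pvAval]

lemma pvColApply_length (l : List Char) (cols : List Int) (i : Nat) :
    (pvColApply cols i l).length = cols.length := by
  induction l generalizing cols i with
  | nil => simp [pvColApply]
  | cons c cs ih => simp [pvColApply, ih]

lemma pvColApply_getD (l : List Char) (i : Nat) (cols : List Int) (j : Nat)
    (hle : i + l.length ≤ cols.length) :
    (pvColApply cols i l).getD j 0
      = if i ≤ j ∧ j < i + l.length then 2 * cols.getD j 0 + pvBit (l.getD (j - i) ' ')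
        else cols.getD j 0 := by
  induction l generalizing i cols with
  | nil => simp [pvColApply]
  | cons c cs ih =>
    simp only [pvColApply]
    rw [ih (i + 1) (cols.set i (2 * cols.getD i 0 + pvBit c))
          (by rw [List.length_set]; simp at hle; omega)]
    by_cases hj : j = i
    · subst hj
      have hi : j < cols.length := by simp at hle; omega
      rw [if_neg (by omega), if_pos (by simp only [List.length_cons]; omega)]
      simp only [List.getD]
      rw [List.getElem?_set_eq_of_lt _ hi]
      simp
    · have hset : (cols.set i (2 * cols.getD i 0 + pvBit c)).getD j 0 = cols.getD j 0 := by
        simp only [List.getD]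
        rw [List.getElem?_set_ne (by omega : i ≠ j)]
      rw [hset]
      by_cases hrange : i + 1 ≤ j ∧ j < i + 1 + cs.length
      · rw [if_pos hrange, if_pos (by simp; omega)]
        have hsub : j - i = (j - (i + 1)) + 1 := by omega
        simp [hsub]
      · rw [if_neg hrange, if_neg (by simp; omega)]

lemma pv_colfold_getD (ls : List String) (cols : List Int) (j : Nat)
    (hw : ∀ s ∈ ls, s.toList.length ≤ cols.length) (hj : j < cols.length) :
    (ls.foldl (fun cs s => pvColApply cs 0 s.toList) cols).getD j 0
      = pvAval (cols.getD j 0) (ls.filterMap (fun s => s.toList[j]?)) := by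
  induction ls generalizing cols with
  | nil => simp [pvAval]
  | cons s ls ih =>
    simp only [List.foldl_cons, List.filterMap_cons]
    have hs : s.toList.length ≤ cols.length := hw s (by simp)
    rw [ih (pvColApply cols 0 s.toList)
          (by intro t ht; rw [pvColApply_length]; exact hw t (by simp [ht]))
          (by rwa [pvColApply_length])]
    rw [pvColApply_getD _ 0 _ _ (by simpa using hs)]
    by_cases hjs : j < s.toList.length
    · rw [if_pos ⟨Nat.zero_le _, by simpa using hjs⟩]
      rw [List.getElem?_eq_getElem hjs]
      simp [pvAval, List.getD, List.getElem?_eq_getElem hjs]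
    · rw [if_neg (by simp at hjs ⊢; omega)]
      rw [List.getElem?_eq_none (by omega)]

lemma pv_colfold_length (ls : List String) (cols : List Int) :
    (ls.foldl (fun cs s => pvColApply cs 0 s.toList) cols).length = cols.length := by
  induction ls generalizing cols with
  | nil => rfl
  | cons s ls ih => simp [List.foldl_cons, ih, pvColApply_length]

def pvColScatter (cc : List (List Char)) (i : Nat) : List Char → List (List Char)
  | [] => cc
  | c :: cs => pvColScatter (cc.set i (cc.getD i [] ++ [c])) (i + 1) cs

lemma pv_scatter_inner_eq (l : List Char) (i : Nat) (cc : List (List Char)) :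
    (PySem.List.enumerate l (i : Int)).foldl
        (fun cc xc => PySem.List.pySetD cc xc.1 (PySem.List.pyGetD cc xc.1 [] ++ [xc.2])) cc
      = pvColScatter cc i l := by
  induction l generalizing i cc with
  | nil => simp [PySem.List.enumerate_nil, pvColScatter]
  | cons c cs ih =>
    rw [PySem.List.enumerate_cons, List.foldl_cons]
    have hcast : ((i : Int) + 1) = ((i + 1 : Nat) : Int) := by push_cast; ring
    rw [hcast]
    simp only [PySem.List.pySetD_natCast, PySem.List.pyGetD_natCast]
    exact ih (i + 1) (cc.set i (cc.getD i [] ++ [c]))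

lemma pv_scatter_inner_zero (l : List Char) (cc : List (List Char)) :
    (PySem.List.enumerate l 0).foldl
        (fun cc xc => PySem.List.pySetD cc xc.1 (PySem.List.pyGetD cc xc.1 [] ++ [xc.2])) cc
      = pvColScatter cc 0 l := by
  simpa using pv_scatter_inner_eq l 0 cc

lemma pvColScatter_length (l : List Char) (cc : List (List Char)) (i : Nat) :
    (pvColScatter cc i l).length = cc.length := by
  induction l generalizing cc i with
  | nil => simp [pvColScatter]
  | cons c cs ih => simp [pvColScatter, ih]

lemma pvColScatter_getD (l : List Char) (i : Nat) (cc : List (List Char)) (j : Nat)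
    (hle : i + l.length ≤ cc.length) :
    (pvColScatter cc i l).getD j []
      = if i ≤ j ∧ j < i + l.length then cc.getD j [] ++ [l.getD (j - i) ' ']
        else cc.getD j [] := by
  induction l generalizing i cc with
  | nil => simp [pvColScatter]
  | cons c cs ih =>
    simp only [pvColScatter]
    rw [ih (i + 1) (cc.set i (cc.getD i [] ++ [c]))
          (by rw [List.length_set]; simp at hle; omega)]
    by_cases hj : j = i
    · subst hj
      have hi : j < cc.length := by simp at hle; omega
      rw [if_neg (by omega), if_pos (by simp only [List.length_cons]; omega)]
      simp only [List.getD]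
      rw [List.getElem?_set_eq_of_lt _ hi]
      simp
    · have hset : (cc.set i (cc.getD i [] ++ [c])).getD j [] = cc.getD j [] := by
        simp only [List.getD]
        rw [List.getElem?_set_ne (by omega : i ≠ j)]
      rw [hset]
      by_cases hrange : i + 1 ≤ j ∧ j < i + 1 + cs.length
      · rw [if_pos hrange, if_pos (by simp; omega)]
        have hsub : j - i = (j - (i + 1)) + 1 := by omega
        simp [hsub]
      · rw [if_neg hrange, if_neg (by simp; omega)]

lemma pv_scatterfold_length (ls : List String) (cc : List (List Char)) :
    (ls.foldl (fun cc s => pvColScatter cc 0 s.toList) cc).length = cc.length := by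
  induction ls generalizing cc with
  | nil => rfl
  | cons s ls ih => simp [List.foldl_cons, ih, pvColScatter_length]

lemma pv_scatterfold_getD (ls : List String) (cc : List (List Char)) (j : Nat)
    (hw : ∀ s ∈ ls, s.toList.length ≤ cc.length) (hj : j < cc.length) :
    (ls.foldl (fun cc s => pvColScatter cc 0 s.toList) cc).getD j []
      = cc.getD j [] ++ ls.filterMap (fun s => s.toList[j]?) := by
  induction ls generalizing cc with
  | nil => simp
  | cons s ls ih =>
    simp only [List.foldl_cons, List.filterMap_cons]
    have hs : s.toList.length ≤ cc.length := hw s (by simp)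
    rw [ih (pvColScatter cc 0 s.toList)
          (by intro t ht; rw [pvColScatter_length]; exact hw t (by simp [ht]))
          (by rwa [pvColScatter_length])]
    rw [pvColScatter_getD _ 0 _ _ (by simpa using hs)]
    by_cases hjs : j < s.toList.length
    · rw [if_pos ⟨Nat.zero_le _, by simpa using hjs⟩]
      rw [List.getElem?_eq_getElem hjs]
      simp [List.getD, List.getElem?_eq_getElem hjs]
    · rw [if_neg (by simp at hjs ⊢; omega)]
      rw [List.getElem?_eq_none (by omega)]

lemma pv_outer_eq (ls : List String) (k : Nat) (rows cols : List Int)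
    (hlen : rows.length = k + ls.length)
    (hzero : ∀ j, k ≤ j → rows.getD j 0 = 0) :
    (PySem.List.enumerate ls (k : Int)).foldl
        (fun st yl => (PySem.List.enumerate yl.2.toList 0).foldl (pvAStep yl.1) st)
        (rows, cols)
      = (rows.take k ++ ls.map (fun s => pvAval 0 s.toList),
         ls.foldl (fun cs s => pvColApply cs 0 s.toList) cols) := by
  induction ls generalizing k rows cols with
  | nil =>
    have : rows.length ≤ k := by simp at hlen; omega
    simp [PySem.List.enumerate_nil, List.take_of_length_le this]
  | cons s ls ih =>
    rw [PySem.List.enumerate_cons, List.foldl_cons]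
    have hk : k < rows.length := by simp at hlen; omega
    have hinner := pv_inner_eq s.toList 0 rows cols k hk
    norm_num at hinner
    dsimp only
    rw [hinner]
    rw [show rows[k]?.getD 0 = 0 from hzero k (le_refl k)]
    have : ((k : Int) + 1) = ((k + 1 : Nat) : Int) := by push_cast; ring
    rw [this, ih (k + 1) (rows.set k (pvAval 0 s.toList)) (pvColApply cols 0 s.toList) (by simp [hlen]; omega)
      (by
        intro j hj
        simp [List.getD, List.getElem?_set_ne (by omega : k ≠ j)]
        have := hzero j (by omega)
        simpa [List.getD] using this)]
    have htake : (rows.set k (pvAval 0 s.toList)).take (k + 1)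
        = rows.take k ++ [pvAval 0 s.toList] := by
      rw [List.set_eq_take_append_cons_drop, if_pos hk]
      rw [List.take_append]
      simp [List.take_take, List.length_take, Nat.min_eq_left hk.le,
        show k + 1 - k = 1 by omega]
    rw [htake]
    simp

lemma pv_outer_zero (ls : List String) (rows cols : List Int)
    (hlen : rows.length = ls.length)
    (hzero : ∀ j : Nat, rows.getD j 0 = 0) :
    (PySem.List.enumerate ls 0).foldl
        (fun st yl => (PySem.List.enumerate yl.2.toList 0).foldl (pvAStep yl.1) st)
        (rows, cols)
      = (ls.map (fun s => pvAval 0 s.toList),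
         ls.foldl (fun cs s => pvColApply cs 0 s.toList) cols) := by
  have h := pv_outer_eq ls 0 rows cols (by simpa using hlen) (fun j _ => hzero j)
  norm_num at h
  exact h

-- ===== VERDICT (by name: the statement is the Claim_ definition above) =====
theorem parse_mirror_spec : Claim_equal_parse_mirror := by
  intro ms _hdom hpre
  obtain ⟨hne, hw⟩ := hpre
  obtain ⟨first, rest, rfl⟩ : ∃ f r, ms = f :: r := by
    cases ms with
    | nil => exact absurd rfl hne
    | cons f r => exact ⟨f, r, rfl⟩
  unfold Spec_parse_mirror parse_mirror parse_mirror_alt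
  rw [PySem.List.pyGet?_zero_cons]
  dsimp only
  rw [pv_outer_zero (first :: rest) (List.replicate (first :: rest).length 0)
        (List.replicate first.toList.length 0) (by simp)
        (by intro j; simp [List.getD, List.getElem?_replicate]; split <;> rfl)]
  simp only [Prod.mk.injEq]
  refine ⟨?_, ?_⟩
  · -- rows
    apply List.map_congr_left
    intro t _
    exact (pvVal_eq_aval t.toList).symm
  · -- cols
    simp only [pv_scatter_inner_zero]
    have hw' : ∀ t ∈ first :: rest,
        t.toList.length ≤ (List.replicate first.toList.length ([] : List Char)).length := by
      intro t ht
      simpa using hw t ht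
    have hwA : ∀ t ∈ first :: rest,
        t.toList.length ≤ (List.replicate first.toList.length (0 : Int)).length := by
      intro t ht
      simpa using hw t ht
    apply List.ext_getElem
    · rw [pv_colfold_length]
      simp [pv_scatterfold_length, pvColScatter_length]
    · intro j hj1 hj2
      have hjw : j < first.toList.length := by
        rw [pv_colfold_length] at hj1
        simpa using hj1
      have hgd : ((first :: rest).foldl (fun cs s => pvColApply cs 0 s.toList)
          (List.replicate first.toList.length (0 : Int)))[j]
          = ((first :: rest).foldl (fun cs s => pvColApply cs 0 s.toList)
          (List.replicate first.toList.length (0 : Int))).getD j 0 := by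
        rw [List.getD, List.getElem?_eq_getElem hj1]
        rfl
      have hjsc : j < ((first :: rest).foldl (fun cc s => pvColScatter cc 0 s.toList)
          (List.replicate first.toList.length ([] : List Char))).length := by
        rw [pv_scatterfold_length]
        simpa using hjw
      have hsc : ((first :: rest).foldl (fun cc s => pvColScatter cc 0 s.toList)
          (List.replicate first.toList.length ([] : List Char)))[j]
          = ((first :: rest).foldl (fun cc s => pvColScatter cc 0 s.toList)
          (List.replicate first.toList.length ([] : List Char))).getD j [] := by
        rw [List.getD, List.getElem?_eq_getElem hjsc]
        rfl
      rw [hgd, pv_colfold_getD _ _ j hwA (by simpa using hjw)]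
      rw [List.getElem_map, hsc, pv_scatterfold_getD _ _ j hw' (by simpa using hjw)]
      have hjw' : j < first.length := by simpa using hjw
      simp [pvVal_eq_aval, List.getD, hjw']
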